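-- pv_equiv track=rewrite | github.com/patopnp/UCSD---Data-Structures-And-Algorithms-Specialization | Data structures - Week 4/common_substring.py | HashDictionary
-- ===== SOURCE A (Python) =====
-- def HashValue(s, p, x):
--     hashvalue = 0
--     for i in range(len(s) - 1, -1, -1):
--         hashvalue = (hashvalue * x + ord(s[i])) % p
--     return hashvalue
--
-- def HashDictionary(s, p_len, prime, x):
--     D = {}
--     substring = s[len(s) - p_len:]
--     last = HashValue(substring, prime, x)
--     D[last] = len(s) - p_len
--     y = pow(x, p_len, prime)
--     for j in range(len(s) - p_len - 1, - 1, - 1):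
--         current = (x * last + ord(s[j]) - y * ord(s[j + p_len])) % prime
--         D[current] = j
--         last = current
--     return D
-- ===== SOURCE B (Python) =====
-- def HashValue(s, p, x):
--     hashvalue = 0
--     for i in range(len(s) - 1, -1, -1):
--         hashvalue = (hashvalue * x + ord(s[i])) % p
--     return hashvalue
--
-- def HashDictionary(s, p_len, prime, x):
--     # Direct recomputation: no rolling state (y, last); each window hashed from scratch.
--     D = {}
--     D[HashValue(s[len(s) - p_len:], prime, x)] = len(s) - p_len
--     for j in range(len(s) - p_len - 1, -1, -1):
--         D[HashValue(s[j:j + p_len], prime, x)] = j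
--     return D
-- ===== Notes on version B (the rewrite author's own statement) =====
-- stated objective: alternative
-- what changed: The incremental rolling-hash recurrence (maintaining last and the precomputed power y, updating each hash in O(1) from the previous window) is replaced by a stateless direct recomputation that hashes each length-p_len window from scratch with HashValue; equal results rest on the modular identity x*H(w')+ord(c)-x^p_len*ord(d) = H(w) (mod prime).
import Mathlib
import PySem

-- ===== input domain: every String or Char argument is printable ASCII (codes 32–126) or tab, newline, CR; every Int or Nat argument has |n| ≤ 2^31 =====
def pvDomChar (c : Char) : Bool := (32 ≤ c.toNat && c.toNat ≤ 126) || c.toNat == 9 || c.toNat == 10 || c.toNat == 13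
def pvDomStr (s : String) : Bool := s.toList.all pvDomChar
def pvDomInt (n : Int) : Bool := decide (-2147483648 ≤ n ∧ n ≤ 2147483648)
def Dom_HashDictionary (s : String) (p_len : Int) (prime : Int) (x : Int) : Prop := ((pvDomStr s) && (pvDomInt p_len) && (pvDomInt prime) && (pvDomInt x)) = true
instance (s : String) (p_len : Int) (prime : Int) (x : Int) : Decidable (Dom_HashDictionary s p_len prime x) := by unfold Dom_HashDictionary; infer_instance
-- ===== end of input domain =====

-- B replaces A's incremental rolling-hash recurrence (state `last` and power `y`) by a stateless
-- direct recomputation of each window's hash; objective: alternative (not faster).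

-- ===== PORT A =====
-- helper HashValue (shared by both Pythons): h = (h*x + ord(s[i])) % p for i = len-1 .. 0
def pvHashValue (l : List Char) (p : Int) (x : Int) : Int :=
  (PySem.List.pyRange ((l.length : Int) - 1) (-1) (-1)).foldl
    (fun h i => PySem.Int.mod (h * x + ((PySem.List.pyGetD l i ' ').toNat : Int)) p) 0

-- pow(x, p_len, prime): CPython's three-argument pow is binary modular exponentiation; ported
-- step for step (square, reduce, multiply on odd bit); provably equal to PySem.Int.powMod (pvPowMod_eq below)
def pvPowMod (b : Int) (e : Nat) (m : Int) : Int :=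
  if e = 0 then PySem.Int.mod 1 m
  else
    let h := pvPowMod b (e / 2) m
    let h2 := PySem.Int.mod (h * h) m
    if e % 2 = 1 then PySem.Int.mod (h2 * b) m else h2
termination_by e
decreasing_by omega

-- A's loop body: current = (x*last + ord(s[j]) - y*ord(s[j+p_len])) % prime; D[current] = j; last = current
def pvStepA (cs : List Char) (p_len : Int) (prime : Int) (x : Int) (y : Int)
    (st : PySem.Dict Int Int × Int) (j : Int) : PySem.Dict Int Int × Int :=
  let current := PySem.Int.mod (x * st.2 + ((PySem.List.pyGetD cs j ' ').toNat : Int)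
                    - y * ((PySem.List.pyGetD cs (j + p_len) ' ').toNat : Int)) prime
  (st.1.insert current j, current)

def HashDictionary (s : String) (p_len : Int) (prime : Int) (x : Int) : List (Int × Int) :=
  let cs := s.toList
  let n : Int := PySem.List.len cs
  let substring := PySem.List.slice cs (some (n - p_len)) none      -- s[len(s) - p_len:]
  let last := pvHashValue substring prime x
  let D : PySem.Dict Int Int := (PySem.Dict.empty).insert last (n - p_len)
  let y := pvPowMod x p_len.toNat prime                     -- pow(x, p_len, prime); p_len ≥ 0 under Pre_
  ((PySem.List.pyRange (n - p_len - 1) (-1) (-1)).foldl (pvStepA cs p_len prime x y) (D, last)).1.items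

-- ===== PORT B =====
-- B's loop body: D[HashValue(s[j:j+p_len], prime, x)] = j  (no rolling state)
def pvStepB (cs : List Char) (p_len : Int) (prime : Int) (x : Int)
    (D : PySem.Dict Int Int) (j : Int) : PySem.Dict Int Int :=
  D.insert (pvHashValue (PySem.List.slice cs (some j) (some (j + p_len))) prime x) j

def HashDictionary_alt (s : String) (p_len : Int) (prime : Int) (x : Int) : List (Int × Int) :=
  let cs := s.toList
  let n : Int := PySem.List.len cs
  let D : PySem.Dict Int Int :=
    (PySem.Dict.empty).insert (pvHashValue (PySem.List.slice cs (some (n - p_len)) none) prime x) (n - p_len)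
  ((PySem.List.pyRange (n - p_len - 1) (-1) (-1)).foldl (pvStepB cs p_len prime x) D).items

-- ===== PRECONDITION & SPEC =====
-- A raises ZeroDivisionError when prime = 0 and IndexError (or ValueError from pow) when p_len < 0; it returns on all other inputs.
def Pre_HashDictionary (s : String) (p_len : Int) (prime : Int) (x : Int) : Prop :=
  prime ≠ 0 ∧ 0 ≤ p_len
instance (s : String) (p_len : Int) (prime : Int) (x : Int) : Decidable (Pre_HashDictionary s p_len prime x) := by unfold Pre_HashDictionary; infer_instance

def pvWitness_HashDictionary : String × Int × Int × Int := ("aba", 2, 97, 31)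

def Spec_HashDictionary (s : String) (p_len : Int) (prime : Int) (x : Int) (out : List (Int × Int)) : Prop := out = HashDictionary_alt s p_len prime x
instance (s : String) (p_len : Int) (prime : Int) (x : Int) (out : List (Int × Int)) : Decidable (Spec_HashDictionary s p_len prime x out) := by unfold Spec_HashDictionary; infer_instance

-- ===== CLAIM (what is proved, stated in full; the proofs are below) =====
def Claim_equal_HashDictionary : Prop := ∀ (s : String) (p_len : Int) (prime : Int) (x : Int), Dom_HashDictionary s p_len prime x → Pre_HashDictionary s p_len prime x → Spec_HashDictionary s p_len prime x (HashDictionary s p_len prime x)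

-- ===== LEMMAS AND PROOFS =====

-- polynomial value of a window: pvPoly x [c0, c1, …] = ord c0 + ord c1 * x + ord c2 * x^2 + …
def pvPoly (x : Int) : List Char → Int
  | [] => 0
  | c :: t => (c.toNat : Int) + x * pvPoly x t

-- Python-mod congruence (PySem.Int.mod is Int.fmod)
theorem pvModCongr (p a b : Int) (h : p ∣ (a - b)) :
    PySem.Int.mod a p = PySem.Int.mod b p := by
  show Int.fmod a p = Int.fmod b p
  rw [Int.fmod_eq_fmod_iff_fmod_sub_eq_zero]
  exact (PySem.Int.mod_eq_zero_iff_dvd _ _).2 h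

theorem pvDvdSubMod (p a : Int) : p ∣ (a - PySem.Int.mod a p) :=
  Int.dvd_self_sub_of_fmod_eq rfl

theorem pvPowMod_eq (b : Int) (e : Nat) (m : Int) :
    pvPowMod b e m = PySem.Int.powMod b e m := by
  induction e using Nat.strong_induction_on with
  | _ e ih =>
    show pvPowMod b e m = PySem.Int.mod (b ^ e) m
    rw [pvPowMod]
    by_cases h0 : e = 0
    · simp [h0]
    · simp only [h0, if_false]
      rw [ih (e / 2) (by omega)]
      simp only [PySem.Int.powMod]
      obtain ⟨k1, hk1⟩ := pvDvdSubMod m (b ^ (e / 2))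
      have hsq : PySem.Int.mod (PySem.Int.mod (b ^ (e / 2)) m * PySem.Int.mod (b ^ (e / 2)) m) m
          = PySem.Int.mod (b ^ (e / 2) * b ^ (e / 2)) m := by
        apply pvModCongr
        exact ⟨-(k1 * (PySem.Int.mod (b ^ (e / 2)) m + b ^ (e / 2))),
          by linear_combination (-(PySem.Int.mod (b ^ (e / 2)) m + b ^ (e / 2))) * hk1⟩
      by_cases hodd : e % 2 = 1
      · simp only [hodd, if_true, hsq]
        rw [← pow_add]
        obtain ⟨k2, hk2⟩ := pvDvdSubMod m (b ^ (e / 2 + e / 2))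
        have : PySem.Int.mod (PySem.Int.mod (b ^ (e / 2 + e / 2)) m * b) m
            = PySem.Int.mod (b ^ (e / 2 + e / 2) * b) m := by
          apply pvModCongr
          exact ⟨-(k2 * b), by linear_combination (-b) * hk2⟩
        rw [this]
        congr 1
        rw [← pow_succ]
        congr 1
        omega
      · simp only [hodd, if_false, hsq, ← pow_add]
        congr 2
        omega

theorem pvHashValue_eq_foldr (l : List Char) (p x : Int) :
    pvHashValue l p x
      = l.foldr (fun c h => PySem.Int.mod (h * x + ((c.toNat : Int))) p) 0 := by
  unfold pvHashValue
  rw [PySem.List.pyRange_neg_one_eq_reverse]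
  rw [List.foldl_reverse]
  have hm : (PySem.List.pyRange (-1 + 1) ((l.length : Int) - 1 + 1) 1).map (fun j => PySem.List.pyGetD l j ' ') = l := by
    have := PySem.List.map_pyGetD_pyRange_zero (xs := l) (d := ' ')
    simpa using this
  calc (PySem.List.pyRange (-1 + 1) ((l.length : Int) - 1 + 1) 1).foldr
          (fun i h => PySem.Int.mod (h * x + ((PySem.List.pyGetD l i ' ').toNat : Int)) p) 0
      = ((PySem.List.pyRange (-1 + 1) ((l.length : Int) - 1 + 1) 1).map (fun j => PySem.List.pyGetD l j ' ')).foldr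
          (fun c h => PySem.Int.mod (h * x + ((c.toNat : Int))) p) 0 := by
        rw [List.foldr_map]
    _ = l.foldr (fun c h => PySem.Int.mod (h * x + ((c.toNat : Int))) p) 0 := by rw [hm]

theorem pvFoldr_eq_mod (l : List Char) (p x : Int) :
    l.foldr (fun c h => PySem.Int.mod (h * x + ((c.toNat : Int))) p) 0
      = PySem.Int.mod (pvPoly x l) p := by
  induction l with
  | nil => show (0:Int) = PySem.Int.mod 0 p; simp [PySem.Int.mod]
  | cons c t ih =>
    show PySem.Int.mod _ p = _
    rw [ih]
    apply pvModCongr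
    obtain ⟨k, hk⟩ := pvDvdSubMod p (pvPoly x t)
    exact ⟨-(k * x), by simp only [pvPoly]; linear_combination (-x) * hk⟩

theorem pvHashValue_eq_mod (l : List Char) (p x : Int) :
    pvHashValue l p x = PySem.Int.mod (pvPoly x l) p := by
  rw [pvHashValue_eq_foldr, pvFoldr_eq_mod]

theorem pvPoly_append_singleton (x : Int) (t : List Char) (d : Char) :
    pvPoly x (t ++ [d]) = pvPoly x t + x ^ t.length * (d.toNat : Int) := by
  induction t with
  | nil => simp [pvPoly]
  | cons c t ih => simp only [List.cons_append, pvPoly, ih, List.length_cons]; ring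

-- the rolling-hash update computes exactly the direct hash of the shifted window
theorem pvStep_eq (cs : List Char) (prime x : Int) (pn j : Nat)
    (hj : j + pn < cs.length) :
    PySem.Int.mod (x * pvHashValue ((cs.drop (j+1)).take pn) prime x
        + ((PySem.List.pyGetD cs (j : Int) ' ').toNat : Int)
        - PySem.Int.powMod x pn prime * ((PySem.List.pyGetD cs ((j : Int) + (pn : Int)) ' ').toNat : Int)) prime
      = pvHashValue ((cs.drop j).take pn) prime x := by
  have hjlen : j < cs.length := by omega
  have hjp : j + pn < cs.length := hj
  have hc : PySem.List.pyGetD cs (j : Int) ' ' = cs[j] := by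
    simp [List.getD_eq_getElem?_getD, hjlen]
  have hd : PySem.List.pyGetD cs ((j : Int) + (pn : Int)) ' ' = cs[j + pn] := by
    have : ((j : Int) + (pn : Int)) = ((j + pn : Nat) : Int) := by push_cast; ring
    rw [this]
    simp only [PySem.List.pyGetD_natCast, List.getD_eq_getElem?_getD,
      List.getElem?_eq_getElem hjp, Option.getD_some]
  rw [hc, hd, pvHashValue_eq_mod, pvHashValue_eq_mod]
  show PySem.Int.mod (x * PySem.Int.mod _ prime + _ - PySem.Int.mod (x ^ pn) prime * _) prime = _
  rcases Nat.eq_zero_or_pos pn with h0 | hpos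
  · subst h0
    simp only [List.take_zero, pvPoly, pow_zero, Nat.add_zero]
    apply pvModCongr
    obtain ⟨k1, hk1⟩ := pvDvdSubMod prime (0 : Int)
    obtain ⟨k2, hk2⟩ := pvDvdSubMod prime (1 : Int)
    exact ⟨-(k1 * x) + k2 * (cs[j].toNat : Int), by linear_combination (-x) * hk1 + ((cs[j].toNat : Int)) * hk2⟩
  · obtain ⟨m, rfl⟩ : ∃ m, pn = m + 1 := ⟨pn - 1, by omega⟩
    set t : List Char := (cs.drop (j+1)).take m with ht
    have htlen : t.length = m := by
      simp [ht, List.length_take, List.length_drop]; omega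
    have hw1 : (cs.drop (j+1)).take (m+1) = t ++ [cs[j + (m+1)]] := by
      rw [List.take_add_one]
      have hlt : m < (cs.drop (j+1)).length := by simp [List.length_drop]; omega
      simp [ht, List.getElem?_eq_getElem hlt, List.getElem_drop]
      congr 1
      omega
    have hwj : (cs.drop j).take (m+1) = cs[j] :: t := by
      rw [List.drop_eq_getElem_cons hjlen, List.take_succ_cons]
    rw [hw1, hwj, pvPoly_append_singleton, htlen]
    apply pvModCongr
    obtain ⟨k1, hk1⟩ := pvDvdSubMod prime (pvPoly x t + x ^ m * (cs[j + (m+1)].toNat : Int))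
    obtain ⟨k2, hk2⟩ := pvDvdSubMod prime (x ^ (m+1))
    refine ⟨-(k1 * x) + k2 * (cs[j + (m+1)].toNat : Int), ?_⟩
    simp only [pvPoly]
    linear_combination (-x) * hk1 + ((cs[j + (m+1)].toNat : Int)) * hk2

-- A's stateful loop, started with the hash of the window at m, equals B's stateless loop
theorem pvLoop (cs : List Char) (prime x : Int) (pn : Nat) :
    ∀ (m : Nat) (D : PySem.Dict Int Int), m + pn ≤ cs.length →
    ((PySem.List.pyRange ((m : Int) - 1) (-1) (-1)).foldl
        (pvStepA cs (pn : Int) prime x (pvPowMod x pn prime))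
        (D, pvHashValue ((cs.drop m).take pn) prime x)).1
      = (PySem.List.pyRange ((m : Int) - 1) (-1) (-1)).foldl (pvStepB cs (pn : Int) prime x) D := by
  intro m
  induction m with
  | zero =>
    intro D _
    rw [PySem.List.pyRange_neg_one_eq_nil (by norm_num)]
    simp
  | succ k ih =>
    intro D hk
    have hcons : PySem.List.pyRange (((k+1 : Nat) : Int) - 1) (-1) (-1)
        = ((k : Nat) : Int) :: PySem.List.pyRange (((k : Nat) : Int) - 1) (-1) (-1) := by
      have : (((k+1 : Nat) : Int) - 1) = ((k : Nat) : Int) := by push_cast; ring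
      rw [this, PySem.List.pyRange_neg_one_cons (by omega)]
    rw [hcons, List.foldl_cons, List.foldl_cons]
    have hstep : pvStepA cs (pn : Int) prime x (pvPowMod x pn prime)
          (D, pvHashValue ((cs.drop (k+1)).take pn) prime x) ((k : Nat) : Int)
        = (D.insert (pvHashValue ((cs.drop k).take pn) prime x) ((k : Nat) : Int),
           pvHashValue ((cs.drop k).take pn) prime x) := by
      show (_, _) = _
      rw [pvPowMod_eq, pvStep_eq cs prime x pn k (by omega)]
    have hstepB : pvStepB cs (pn : Int) prime x D ((k : Nat) : Int)
        = D.insert (pvHashValue ((cs.drop k).take pn) prime x) ((k : Nat) : Int) := by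
      unfold pvStepB
      congr 2
      rw [PySem.List.slice_natCast_add]
    rw [hstep, hstepB]
    exact ih _ (by omega)

theorem pvMain (s : String) (p_len prime x : Int) (hpl : 0 ≤ p_len) :
    HashDictionary s p_len prime x = HashDictionary_alt s p_len prime x := by
  obtain ⟨pn, rfl⟩ : ∃ pn : Nat, p_len = (pn : Int) := ⟨p_len.toNat, (Int.toNat_of_nonneg hpl).symm⟩
  unfold HashDictionary HashDictionary_alt
  simp only [PySem.List.len_eq, Int.toNat_natCast]
  set cs := s.toList with hcs
  by_cases hc : (pn : Int) ≤ (cs.length : Int)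
  · obtain ⟨m, hm1, hm2⟩ : ∃ m : Nat, (cs.length : Int) - (pn : Int) = (m : Int) ∧ m + pn = cs.length :=
      ⟨cs.length - pn, by omega, by omega⟩
    have hinit : PySem.List.slice cs (some ((cs.length : Int) - (pn : Int))) none = (cs.drop m).take pn := by
      rw [hm1, PySem.List.slice_from_natCast]
      rw [List.take_of_length_le (by simp [List.length_drop]; omega)]
    have hstart : (cs.length : Int) - (pn : Int) - 1 = (m : Int) - 1 := by omega
    rw [hinit, hstart, hm1]
    rw [pvLoop cs prime x pn m _ (by omega)]
  · have hnil : PySem.List.pyRange ((cs.length : Int) - (pn : Int) - 1) (-1) (-1) = [] :=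
      PySem.List.pyRange_neg_one_eq_nil (by omega)
    rw [hnil]
    simp

-- ===== VERDICT (by name: the statement is the Claim_ definition above) =====
theorem HashDictionary_spec : Claim_equal_HashDictionary := by
  intro s p_len prime x _hdom hpre
  unfold Spec_HashDictionary
  exact pvMain s p_len prime x hpre.2
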